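-- pv_equiv track=rewrite | github.com/konradge/advent-of-code | 2023/solutions/day12.py | mayBeValid
-- ===== SOURCE A (Python) =====
-- def mayBeValid(partial: list[str], numsP: list[int]):
--     numIdx = 0
--     idx = 0
--     start: int | None = None
--     while idx < len(partial):
--         if partial[idx] == "#":
--             if start == None:
--                 start = idx
--         elif partial[idx] == "." and start != None:
--             if numIdx == len(numsP) or numsP[numIdx] != idx - start:
--                 return False
--             else:
--                 numIdx += 1
--                 start = None
--         elif partial[idx] == "?":
--             if start != None:
--                 if numIdx == len(numsP) or numsP[numIdx] < idx - start:
--                     return False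
--                 else:
--                     return None
--             else:
--                 return None
--
--         idx += 1
--
--     if numIdx == len(numsP) - 1 and start != None and idx - start == numsP[numIdx]:
--         return True
--     elif numIdx == len(numsP) == 0 and start == None:
--         return True
--     else:
--         return False
-- ===== SOURCE B (Python) =====
-- def mayBeValid(partial: list[str], numsP: list[int]):
--     # Two-phase: extract the maximal '#'-started run lengths before the first '?'
--     # with a two-pointer scan, then compare run lists against numsP.
--     q = partial.index("?") if "?" in partial else len(partial)
--     runs = []
--     open_run = False
--     i = 0
--     while i < q:
--         if partial[i] == "#":
--             j = i + 1
--             while j < q and partial[j] != ".":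
--                 j += 1
--             runs.append(j - i)
--             open_run = (j == q)
--             i = j
--         else:
--             i += 1
--     closed = runs[:-1] if open_run else runs
--     k = len(closed)
--     if numsP[:k] != closed:
--         return False
--     if q < len(partial):
--         if open_run:
--             if k == len(numsP) or numsP[k] < runs[-1]:
--                 return False
--             return None
--         return None
--     if open_run:
--         return k == len(numsP) - 1 and runs[-1] == numsP[k]
--     return k == 0 and len(numsP) == 0
-- ===== Notes on version B (the rewrite author's own statement) =====
-- stated objective: alternative
-- what changed: A's single stateful character machine (index/open-run-start state with inline group checks and early returns) is replaced by a two-phase decomposition: slice off the prefix before the first '?', extract the '#'-run lengths with a two-pointer scan, then decide by one list comparison of the closed runs against a prefix of numsP plus a single terminal/open-run rule.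
import Mathlib
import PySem

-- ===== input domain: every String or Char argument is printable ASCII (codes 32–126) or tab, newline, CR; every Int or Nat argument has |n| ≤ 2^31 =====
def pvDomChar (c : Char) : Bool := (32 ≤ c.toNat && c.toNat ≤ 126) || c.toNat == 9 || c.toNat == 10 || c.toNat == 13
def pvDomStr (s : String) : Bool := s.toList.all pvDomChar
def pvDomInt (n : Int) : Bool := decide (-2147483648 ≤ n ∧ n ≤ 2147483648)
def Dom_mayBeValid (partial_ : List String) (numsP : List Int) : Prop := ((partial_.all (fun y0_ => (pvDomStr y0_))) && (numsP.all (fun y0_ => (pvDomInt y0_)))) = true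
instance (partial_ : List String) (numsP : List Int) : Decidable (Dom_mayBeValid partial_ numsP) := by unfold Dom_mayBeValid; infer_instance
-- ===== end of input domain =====

-- B replaces A's single stateful character machine (inline group checks, early returns) by a
-- two-phase decomposition: extract the '#'-run lengths before the first '?', then compare lists.
-- Objective: alternative decomposition; same asymptotic cost.

-- ===== PORT A =====
-- state: idx = current index, numIdx = groups matched so far, start = index where the open run began
def mayBeValidGo (numsP : List Int) : List String → Nat → Nat → Option Nat → Option Bool
  | [], idx, numIdx, start =>
    if (numIdx : Int) = (numsP.length : Int) - 1 ∧ start ≠ none ∧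
        ((idx : Int) - ((start.getD 0 : Nat) : Int)) = numsP.getD numIdx 0 then some true
    else if numIdx = numsP.length ∧ numsP.length = 0 ∧ start = none then some true
    else some false
  | c :: rest, idx, numIdx, start =>
    if c = "#" then
      if start = none then mayBeValidGo numsP rest (idx + 1) numIdx (some idx)
      else mayBeValidGo numsP rest (idx + 1) numIdx start
    else if c = "." ∧ start ≠ none then
      if numIdx = numsP.length ∨ numsP.getD numIdx 0 ≠ (idx : Int) - ((start.getD 0 : Nat) : Int) then
        some false
      else mayBeValidGo numsP rest (idx + 1) (numIdx + 1) none
    else if c = "?" then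
      if start ≠ none then
        if numIdx = numsP.length ∨ numsP.getD numIdx 0 < (idx : Int) - ((start.getD 0 : Nat) : Int) then
          some false
        else none
      else none
    else mayBeValidGo numsP rest (idx + 1) numIdx start

def mayBeValid (partial_ : List String) (numsP : List Int) : Option Bool :=
  mayBeValidGo numsP partial_ 0 0 none

-- ===== PORT B =====
-- two-pointer run extraction: at a "#", extend over non-"." cells (inner while), record the length;
-- returns (run lengths, whether the last run reaches the end of the list)
def bRuns : List String → List Int × Bool
  | [] => ([], false)
  | c :: s =>
    if c = "#" then
      let seg := s.takeWhile (fun x => x ≠ ".")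
      let rest := s.drop seg.length
      let p := bRuns rest
      (((1 : Int) + (seg.length : Int)) :: p.1, rest.isEmpty || p.2)
    else bRuns s
  termination_by l => l.length
  decreasing_by
  · simp only [List.length_drop, List.length_cons]; omega
  · simp only [List.length_cons]; omega

def mayBeValid_alt (partial_ : List String) (numsP : List Int) : Option Bool :=
  let q : Nat := if "?" ∈ partial_ then (PySem.List.index? partial_ "?").getD 0 else partial_.length
  let p := bRuns (partial_.take q)
  let runs := p.1
  let open_run := p.2
  let closed := if open_run then runs.dropLast else runs
  let k := closed.length
  if numsP.take k ≠ closed then some false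
  else if q < partial_.length then
    if open_run then
      if k = numsP.length ∨ numsP.getD k 0 < runs.getLastD 0 then some false else none
    else none
  else if open_run then
    some (decide ((k : Int) = (numsP.length : Int) - 1 ∧ runs.getLastD 0 = numsP.getD k 0))
  else some (decide (k = 0 ∧ numsP.length = 0))

-- ===== PRECONDITION & SPEC =====
def Spec_mayBeValid (partial_ : List String) (numsP : List Int) (out : Option Bool) : Prop := out = mayBeValid_alt partial_ numsP
instance (partial_ : List String) (numsP : List Int) (out : Option Bool) : Decidable (Spec_mayBeValid partial_ numsP out) := by unfold Spec_mayBeValid; infer_instance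

-- ===== CLAIM (what is proved, stated in full; the proofs are below) =====
def Claim_equal_mayBeValid : Prop := ∀ (partial_ : List String) (numsP : List Int), Dom_mayBeValid partial_ numsP → Spec_mayBeValid partial_ numsP (mayBeValid partial_ numsP)

-- ===== LEMMAS AND PROOFS =====

def allRuns : List String → Option Int → List Int × Bool
  | [], some L => ([L], true)
  | [], none => ([], false)
  | c :: s, r =>
    if c = "#" then allRuns s (some (r.getD 0 + 1))
    else if c = "." then
      match r with
      | some L => let p := allRuns s none; (L :: p.1, p.2)
      | none => allRuns s none
    else allRuns s (r.map (· + 1))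

def refGo (numsP : List Int) : List String → Nat → Option Int → Option Bool
  | [], numIdx, r =>
    if (numIdx : Int) = (numsP.length : Int) - 1 ∧ r ≠ none ∧ r.getD 0 = numsP.getD numIdx 0 then some true
    else if numIdx = numsP.length ∧ numsP.length = 0 ∧ r = none then some true
    else some false
  | c :: rest, numIdx, r =>
    if c = "#" then refGo numsP rest numIdx (some (r.getD 0 + 1))
    else if c = "." ∧ r ≠ none then
      if numIdx = numsP.length ∨ numsP.getD numIdx 0 ≠ r.getD 0 then some false
      else refGo numsP rest (numIdx + 1) none
    else if c = "?" then
      if r ≠ none then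
        if numIdx = numsP.length ∨ numsP.getD numIdx 0 < r.getD 0 then some false else none
      else none
    else refGo numsP rest numIdx (r.map (· + 1))

theorem allRuns_ne_nil_of_open (s : List String) (r : Option Int)
    (h : (allRuns s r).2 = true) : (allRuns s r).1 ≠ [] := by
  fun_induction allRuns s r <;> simp_all

def closedOf (p : List Int × Bool) : List Int := if p.2 then p.1.dropLast else p.1

def judgeCore (numsP : List Int) (n : Nat) (p : List Int × Bool) (hasQ : Bool) : Option Bool :=
  if (numsP.drop n).take (closedOf p).length ≠ closedOf p then some false
  else if hasQ then
    if p.2 then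
      if n + (closedOf p).length = numsP.length ∨
          numsP.getD (n + (closedOf p).length) 0 < p.1.getLastD 0 then some false
      else none
    else none
  else if p.2 then
    some (decide (((n + (closedOf p).length : Nat) : Int) = (numsP.length : Int) - 1 ∧
      p.1.getLastD 0 = numsP.getD (n + (closedOf p).length) 0))
  else some (decide (n + (closedOf p).length = numsP.length ∧ numsP.length = 0))

def judge (numsP : List Int) (l : List String) (n : Nat) (r : Option Int) : Option Bool :=
  judgeCore numsP n (allRuns (l.takeWhile (fun c => c ≠ "?")) r)
    (decide ((l.takeWhile (fun c => c ≠ "?")).length < l.length))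

theorem getLastD_irrel (l : List Int) (d d' : Int) (h : l ≠ []) : l.getLastD d = l.getLastD d' := by
  cases l with
  | nil => simp at h
  | cons a t =>
    rw [List.getLastD_eq_getLast?, List.getLastD_eq_getLast?]
    cases h' : (a :: t).getLast? with
    | none => simp [List.getLast?_eq_none_iff] at h'
    | some x => rfl

theorem judgeCore_shift (numsP : List Int) (n : Nat) (L : Int) (p' : List Int × Bool)
    (q : Bool) (hn : n ≤ numsP.length) (hne : p'.2 = true → p'.1 ≠ []) :
    judgeCore numsP n (L :: p'.1, p'.2) q =
      (if n = numsP.length ∨ numsP.getD n 0 ≠ L then some false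
       else judgeCore numsP (n + 1) p' q) := by
  have hclosed : closedOf (L :: p'.1, p'.2) = L :: closedOf p' := by
    unfold closedOf
    by_cases h2 : p'.2
    · simp only [h2, if_true]
      exact List.dropLast_cons_of_ne_nil (hne h2)
    · simp [h2]
  by_cases hn2 : n = numsP.length
  · have hdrop : numsP.drop n = [] := by subst hn2; simp
    unfold judgeCore
    rw [hclosed]
    simp [hdrop, hn2]
  · have hlt : n < numsP.length := lt_of_le_of_ne hn hn2
    have hdrop : numsP.drop n = numsP[n] :: numsP.drop (n + 1) := List.drop_eq_getElem_cons hlt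
    have hgetD : numsP.getD n 0 = numsP[n] := by
      rw [List.getD_eq_getElem?_getD, List.getElem?_eq_getElem hlt, Option.getD_some]
    unfold judgeCore
    rw [hclosed]
    simp only [hdrop, List.length_cons, List.take_succ_cons, ne_eq, List.cons.injEq, not_and,
      hgetD, hn2, false_or]
    by_cases hv : numsP[n] = L
    · have harith : n + ((closedOf p').length + 1) = n + 1 + (closedOf p').length := by omega
      simp only [harith]
      by_cases h2 : p'.2 = true
      · have hlast : (L :: p'.1).getLastD 0 = p'.1.getLastD 0 := by
          rw [List.getLastD_cons]; exact getLastD_irrel _ _ _ (hne h2)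
        simp only [List.getLastD_eq_getLast?] at hlast
        simp [hv, h2, hlast, ite_not]
      · simp [hv, h2, ite_not]
    · simp [hv, ite_not]

theorem refGo_eq_judge (numsP : List Int) (l : List String) (n : Nat) (r : Option Int)
    (hn : n ≤ numsP.length) : refGo numsP l n r = judge numsP l n r := by
  induction l generalizing n r with
  | nil =>
    cases r with
    | none =>
      simp [refGo, judge, judgeCore, allRuns, closedOf, hn]
      split <;> simp_all
    | some L =>
      simp [refGo, judge, judgeCore, allRuns, closedOf, hn]
      split <;> simp_all
  | cons c l ih =>
    by_cases hq : c = "?"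
    · subst hq
      cases r with
      | none => simp [refGo, judge, judgeCore, allRuns, closedOf, Nat.lt_succ_of_le]
      | some L => simp [refGo, judge, judgeCore, allRuns, closedOf, Nat.lt_succ_of_le]
    · have hpre : ((c :: l).takeWhile (fun x => x ≠ "?")) = c :: (l.takeWhile (fun x => x ≠ "?")) := by
        simp [List.takeWhile_cons, hq]
      by_cases hc : c = "#"
      · have hj : judge numsP (c :: l) n r = judge numsP l n (some (r.getD 0 + 1)) := by
          unfold judge
          rw [hpre]
          have h1 : allRuns (c :: l.takeWhile (fun x => x ≠ "?")) r
              = allRuns (l.takeWhile (fun x => x ≠ "?")) (some (r.getD 0 + 1)) := by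
            simp [allRuns, hc]
          rw [h1]
          simp
        rw [hj, show refGo numsP (c :: l) n r = refGo numsP l n (some (r.getD 0 + 1)) from by
          simp [refGo, hc], ih _ _ hn]
      · by_cases hd : c = "."
        · subst hd
          cases r with
          | none =>
            have hj : judge numsP ("." :: l) n none = judge numsP l n none := by
              unfold judge
              rw [hpre]
              have h1 : allRuns ("." :: l.takeWhile (fun x => x ≠ "?")) none
                  = allRuns (l.takeWhile (fun x => x ≠ "?")) none := by
                simp [allRuns, hc]
              rw [h1]
              simp
            rw [hj, show refGo numsP ("." :: l) n none = refGo numsP l n none from by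
              simp [refGo], ih _ _ hn]
          | some L =>
            have hne := allRuns_ne_nil_of_open (l.takeWhile (fun x => x ≠ "?")) none
            have hall : allRuns ("." :: l.takeWhile (fun x => x ≠ "?")) (some L)
                = ((allRuns (l.takeWhile (fun x => x ≠ "?")) none).1.cons L,
                   (allRuns (l.takeWhile (fun x => x ≠ "?")) none).2) := by
              simp [allRuns]
            have hj : judge numsP ("." :: l) n (some L)
                = (if n = numsP.length ∨ numsP.getD n 0 ≠ L then some false
                   else judge numsP l (n + 1) none) := by
              unfold judge
              rw [hpre, hall]
              rw [judgeCore_shift numsP n L _ _ hn hne]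
              simp
            rw [hj]
            by_cases hcond : n = numsP.length ∨ numsP.getD n 0 ≠ L
            · simp only [List.getD_eq_getElem?_getD] at hcond
              simp [refGo, hcond]
            · have hlt : n < numsP.length := by
                rcases not_or.1 hcond with ⟨h1, _⟩
                exact lt_of_le_of_ne hn h1
              simp only [List.getD_eq_getElem?_getD] at hcond
              rw [show refGo numsP ("." :: l) n (some L) = refGo numsP l (n + 1) none from by
                simp [refGo, hcond], ih _ _ (by omega)]
              simp [hcond]
        · have hj : judge numsP (c :: l) n r = judge numsP l n (r.map (· + 1)) := by
            unfold judge
            rw [hpre]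
            have h1 : allRuns (c :: l.takeWhile (fun x => x ≠ "?")) r
                = allRuns (l.takeWhile (fun x => x ≠ "?")) (r.map (· + 1)) := by
              simp [allRuns, hc, hd]
            rw [h1]
            simp
          rw [hj, show refGo numsP (c :: l) n r = refGo numsP l n (r.map (· + 1)) from by
            simp [refGo, hc, hd, hq], ih _ _ hn]

theorem allRuns_pending (s : List String) (L : Int) :
    allRuns s (some L) =
      ((L + ((s.takeWhile (fun x => x ≠ ".")).length : Int)) :: (allRuns (s.drop (s.takeWhile (fun x => x ≠ ".")).length) none).1,
       (s.drop (s.takeWhile (fun x => x ≠ ".")).length).isEmpty || (allRuns (s.drop (s.takeWhile (fun x => x ≠ ".")).length) none).2) := by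
  induction s generalizing L with
  | nil => simp [allRuns]
  | cons c s ih =>
    by_cases hd : c = "."
    · subst hd
      simp [allRuns, List.takeWhile_cons]
    · have htw : (c :: s).takeWhile (fun x => x ≠ ".") = c :: s.takeWhile (fun x => x ≠ ".") := by
        simp [List.takeWhile_cons, hd]
      by_cases hh : c = "#"
      · subst hh
        simp only [allRuns, if_pos rfl, Option.getD_some, htw, List.length_cons,
          List.drop_succ_cons, ih, if_true, Prod.mk.injEq, List.cons.injEq]
        exact ⟨⟨by push_cast; ring, trivial⟩, trivial⟩
      · simp only [allRuns, if_neg hh, if_neg hd, Option.map_some, htw, List.length_cons,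
          List.drop_succ_cons, ih, Prod.mk.injEq, List.cons.injEq]
        exact ⟨⟨by push_cast; ring, trivial⟩, trivial⟩

theorem bRuns_eq_allRuns (s : List String) : bRuns s = allRuns s none := by
  fun_induction bRuns s with
  | case1 => simp [allRuns]
  | case2 s seg rest p ih =>
    rw [show allRuns ("#" :: s) none = allRuns s (some (0 + 1)) from by simp [allRuns]]
    norm_num
    rw [allRuns_pending, ← ih]
  | case3 c s h ih =>
    by_cases hd : c = "."
    · subst hd; simp [allRuns, ih]
    · simp [allRuns, h, hd, ih]

theorem q_eq_takeWhile_length (l : List String) :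
    (if "?" ∈ l then (PySem.List.index? l "?").getD 0 else l.length)
      = (l.takeWhile (fun c => c ≠ "?")).length := by
  simp only [PySem.List.index?_eq_idxOf?, List.idxOf?, List.idxOf]
  induction l with
  | nil => simp
  | cons a l ih =>
    by_cases h : a = "?"
    · subst h
      simp [List.findIdx?_cons]
    · by_cases hm : "?" ∈ l
      · have hs : (List.findIdx? (fun x => x == "?") l).isSome := by
          simp [List.findIdx?_isSome]
          exact hm
        obtain ⟨k, hk⟩ := Option.isSome_iff_exists.1 hs
        simp [List.findIdx?_cons, List.mem_cons, h, hm, hk, List.takeWhile_cons, Ne.symm h] at ih ⊢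
        omega
      · simp [List.findIdx?_cons, List.mem_cons, h, hm, List.takeWhile_cons, Ne.symm h] at ih ⊢
        omega

theorem take_takeWhile_length {α : Type} (p : α → Bool) (l : List α) :
    l.take (l.takeWhile p).length = l.takeWhile p := by
  induction l with
  | nil => simp
  | cons a l ih =>
    by_cases h : p a
    · simp [h, ih]
    · simp [h]

theorem L1 (numsP : List Int) (l : List String) (idx numIdx : Nat) (start : Option Nat) :
    mayBeValidGo numsP l idx numIdx start
      = refGo numsP l numIdx (start.map (fun s : Nat => (idx : Int) - (s : Int))) := by
  induction l generalizing idx numIdx start with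
  | nil =>
    cases start with
    | none => simp [mayBeValidGo, refGo]
    | some s => simp [mayBeValidGo, refGo]
  | cons c rest ih =>
    by_cases hc : c = "#"
    · cases start with
      | none =>
        simp only [mayBeValidGo, refGo, if_pos hc, if_pos rfl, ih, Option.map_none,
          Option.map_some, Option.getD_none]
        norm_num
      | some s =>
        simp only [mayBeValidGo, refGo, if_pos hc, ih, Option.map_some, Option.getD_some,
          reduceCtorEq, if_neg (by simp : ¬(some s = none))]
        congr 2
        push_cast; ring
    · by_cases hd : c = "."
      · cases start with
        | none =>
          simp [mayBeValidGo, refGo, hc, hd, ih]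
        | some s =>
          simp only [mayBeValidGo, refGo, if_neg hc, hd, Option.map_some, Option.getD_some,
            ih, ne_eq, reduceCtorEq, not_false_iff, and_true, if_pos trivial, true_and]
          rfl
      · by_cases hq : c = "?"
        · cases start <;> simp [mayBeValidGo, refGo, hc, hd, hq]
        · cases start with
          | none => simp [mayBeValidGo, refGo, hc, hd, hq, ih]
          | some s =>
            have h1 : mayBeValidGo numsP (c :: rest) idx numIdx (some s)
                = refGo numsP rest numIdx (some (((idx + 1 : Nat) : Int) - (s : Int))) := by
              simp only [mayBeValidGo, if_neg hc,
                if_neg (show ¬(c = "." ∧ ¬(some s = none)) from by simp [hd]), if_neg hq,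
                ih, Option.map_some]
            have h2 : refGo numsP (c :: rest) numIdx
                  (Option.map (fun s : Nat => (idx : Int) - (s : Int)) (some s))
                = refGo numsP rest numIdx (some ((idx : Int) - (s : Int) + 1)) := by
              simp only [Option.map_some, refGo, if_neg hc,
                if_neg (show ¬(c = "." ∧ ¬(some ((idx : Int) - (s : Int)) = none)) from by simp [hd]),
                if_neg hq]
            rw [h1, h2]
            congr 2
            push_cast; ring

-- ===== VERDICT (by name: the statement is the Claim_ definition above) =====
theorem mayBeValid_spec : Claim_equal_mayBeValid := by
  intro partial_ numsP _
  unfold Spec_mayBeValid mayBeValid mayBeValid_alt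
  rw [L1]
  simp only [Option.map_none]
  rw [refGo_eq_judge _ _ _ _ (Nat.zero_le _)]
  unfold judge judgeCore closedOf
  simp only [q_eq_takeWhile_length, take_takeWhile_length, bRuns_eq_allRuns,
    List.drop_zero, Nat.zero_add, decide_eq_true_eq]
  split_ifs <;> try rfl
  simp only [Option.some.injEq]
  exact decide_eq_decide.mpr (by omega)
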